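-- pv_equiv track=rewrite | github.com/sanjastevanovic/epnurbs | build/lib/epnurbs/createnurbsopening.py | new_check_knot_vector
-- ===== SOURCE A (Python) =====
-- def new_check_knot_vector(degree=0, knot_vector=(), control_points_size=0, tol=0.001):
--     """ Checks if the input knot vector follows the mathematical rules. """
--     if not knot_vector:
--         raise ValueError("Input knot vector cannot be empty")
--
--     # Check the formula; m = p + n + 1
--     if len(knot_vector) is not degree + control_points_size + 1:
--         return False
--
--     # Set up a return value
--     ret_val = True
--
--     # Check ascending order
--     if ret_val:
--         prev_knot = knot_vector[0]
--         for knot in knot_vector: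
--             if prev_knot > knot:
--                 ret_val = False
--                 break
--             prev_knot = knot
--
--     return ret_val
-- ===== SOURCE B (Python) =====
-- def new_check_knot_vector(degree=0, knot_vector=(), control_points_size=0, tol=0.001):
--     """ Checks if the input knot vector follows the mathematical rules. """
--     if not knot_vector:
--         raise ValueError("Input knot vector cannot be empty")
--     if len(knot_vector) != degree + control_points_size + 1:
--         return False
--     kv = list(knot_vector)
--     return kv == sorted(kv)
-- ===== Notes on version B (the rewrite author's own statement) =====
-- stated objective: simpler
-- what changed: Replaces the explicit prev/break ascending scan with a sort-and-compare (list == sorted(list)) and uses a value comparison != instead of A's int-identity 'is not' for the length formula.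
-- intended difference: On non-decreasing knot vectors whose length equals degree+control_points_size+1 but exceeds 256, A returns False because its 'is not' identity test on ints fails outside CPython's small-int cache, while B returns True, which is the intended result of the length-formula check. — e.g. on new_check_knot_vector((0, [0, 0, 0, 0, 0, 0, 0, 0, 0, 0, 0, 0, 0, 0, 0, 0, 0, 0, 0, 0, 0, 0, 0, 0, 0, 0, 0, 0, 0, 0, 0, 0, 0, 0, 0, 0, 0, 0, …): A returns false, B returns true
import Mathlib
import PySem

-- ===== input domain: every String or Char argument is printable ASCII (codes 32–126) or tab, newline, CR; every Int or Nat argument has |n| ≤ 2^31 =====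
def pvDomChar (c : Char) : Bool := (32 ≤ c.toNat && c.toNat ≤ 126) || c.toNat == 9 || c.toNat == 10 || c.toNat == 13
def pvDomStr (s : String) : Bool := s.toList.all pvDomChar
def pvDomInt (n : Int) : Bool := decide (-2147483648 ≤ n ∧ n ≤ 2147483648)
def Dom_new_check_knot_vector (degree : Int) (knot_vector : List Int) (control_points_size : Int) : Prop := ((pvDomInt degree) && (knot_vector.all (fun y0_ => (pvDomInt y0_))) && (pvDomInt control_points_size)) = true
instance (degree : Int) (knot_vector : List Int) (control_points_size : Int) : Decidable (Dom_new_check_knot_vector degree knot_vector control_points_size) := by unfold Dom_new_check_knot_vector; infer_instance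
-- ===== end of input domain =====

-- B replaces A's prev/break ascending scan with sort-and-compare and A's CPython int-identity
-- length test with a value comparison (objective: simpler).

-- ===== PORT A =====
-- the for-loop over the knots with `break` (break = return false)
def pvAscLoop (prev : Int) (l : List Int) : Bool :=
  match l with
  | [] => true
  | k :: rest => if prev > k then false else pvAscLoop k rest

def new_check_knot_vector (degree : Int) (knot_vector : List Int) (control_points_size : Int) : Bool :=
  -- `len(kv) is not degree+cps+1`: CPython int identity holds exactly when the values are
  -- equal AND in the small-int cache; len ≥ 0, so the cached range reduces to len ≤ 256.
  if ¬(((knot_vector.length : Int) = degree + control_points_size + 1) ∧ knot_vector.length ≤ 256) then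
    false
  else
    match knot_vector with
    | [] => true  -- unreachable: Python raises ValueError on empty (excluded by Pre_)
    | k0 :: _ => pvAscLoop k0 knot_vector

-- ===== PORT B =====
def new_check_knot_vector_alt (degree : Int) (knot_vector : List Int) (control_points_size : Int) : Bool :=
  if (knot_vector.length : Int) ≠ degree + control_points_size + 1 then false
  else decide (knot_vector = PySem.List.sorted knot_vector (fun x => x) false)

-- ===== PRECONDITION & SPEC =====
-- Pre_ excludes the empty knot vector, on which A (and B) raise ValueError.
def Pre_new_check_knot_vector (degree : Int) (knot_vector : List Int) (control_points_size : Int) : Prop := knot_vector ≠ []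
instance (degree : Int) (knot_vector : List Int) (control_points_size : Int) : Decidable (Pre_new_check_knot_vector degree knot_vector control_points_size) := by unfold Pre_new_check_knot_vector; infer_instance
def pvWitness_new_check_knot_vector : Int × List Int × Int := (1, [0, 0, 1, 1], 2)

-- On non-decreasing knot vectors whose length equals degree+control_points_size+1 but exceeds 256,
-- A returns False because its `is not` identity test fails outside CPython's small-int cache,
-- while B returns True, the intended result of the length-formula check.
def D_new_check_knot_vector (degree : Int) (knot_vector : List Int) (control_points_size : Int) : Prop :=
  (knot_vector.length : Int) = degree + control_points_size + 1 ∧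
  256 < knot_vector.length ∧ knot_vector.Pairwise (· ≤ ·)
instance (degree : Int) (knot_vector : List Int) (control_points_size : Int) : Decidable (D_new_check_knot_vector degree knot_vector control_points_size) := by unfold D_new_check_knot_vector; infer_instance

def Spec_new_check_knot_vector (degree : Int) (knot_vector : List Int) (control_points_size : Int) (out : Bool) : Prop := ¬ D_new_check_knot_vector degree knot_vector control_points_size → out = new_check_knot_vector_alt degree knot_vector control_points_size
instance (degree : Int) (knot_vector : List Int) (control_points_size : Int) (out : Bool) : Decidable (Spec_new_check_knot_vector degree knot_vector control_points_size out) := by unfold Spec_new_check_knot_vector; infer_instance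

def pvDiffWitness_new_check_knot_vector : Int × List Int × Int := (0, [0, 0, 0, 0, 0, 0, 0, 0, 0, 0, 0, 0, 0, 0, 0, 0, 0, 0, 0, 0, 0, 0, 0, 0, 0, 0, 0, 0, 0, 0, 0, 0, 0, 0, 0, 0, 0, 0, 0, 0, 0, 0, 0, 0, 0, 0, 0, 0, 0, 0, 0, 0, 0, 0, 0, 0, 0, 0, 0, 0, 0, 0, 0, 0, 0, 0, 0, 0, 0, 0, 0, 0, 0, 0, 0, 0, 0, 0, 0, 0, 0, 0, 0, 0, 0, 0, 0, 0, 0, 0, 0, 0, 0, 0, 0, 0, 0, 0, 0, 0, 0, 0, 0, 0, 0, 0, 0, 0, 0, 0, 0, 0, 0, 0, 0, 0, 0, 0, 0, 0, 0, 0, 0, 0, 0, 0, 0, 0, 0, 0, 0, 0, 0, 0, 0, 0, 0, 0, 0, 0, 0, 0, 0, 0, 0, 0, 0, 0, 0, 0, 0, 0, 0, 0, 0, 0, 0, 0, 0, 0, 0, 0, 0, 0, 0, 0, 0, 0, 0, 0, 0, 0, 0, 0, 0, 0, 0, 0, 0, 0, 0, 0, 0, 0, 0, 0, 0, 0, 0,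 0, 0, 0, 0, 0, 0, 0, 0, 0, 0, 0, 0, 0, 0, 0, 0, 0, 0, 0, 0, 0, 0, 0, 0, 0, 0, 0, 0, 0, 0, 0, 0, 0, 0, 0, 0, 0, 0, 0, 0, 0, 0, 0, 0, 0, 0, 0, 0, 0, 0, 0, 0, 0, 0, 0, 0, 0, 0, 0, 0, 0, 0, 0, 0, 0, 0, 0, 0], 256)
def pvDiffWitnessOut_new_check_knot_vector : Bool × Bool := (false, true)

-- ===== CLAIM (what is proved, stated in full; the proofs are below) =====
def Claim_unchanged_new_check_knot_vector : Prop := ∀ (degree : Int) (knot_vector : List Int) (control_points_size : Int), Dom_new_check_knot_vector degree knot_vector control_points_size → Pre_new_check_knot_vector degree knot_vector control_points_size → Spec_new_check_knot_vector degree knot_vector control_points_size (new_check_knot_vector degree knot_vector control_points_size)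
def Claim_changed_new_check_knot_vector : Prop := Dom_new_check_knot_vector (pvDiffWitness_new_check_knot_vector.1) (pvDiffWitness_new_check_knot_vector.2.1) (pvDiffWitness_new_check_knot_vector.2.2) ∧ Pre_new_check_knot_vector (pvDiffWitness_new_check_knot_vector.1) (pvDiffWitness_new_check_knot_vector.2.1) (pvDiffWitness_new_check_knot_vector.2.2) ∧ D_new_check_knot_vector (pvDiffWitness_new_check_knot_vector.1) (pvDiffWitness_new_check_knot_vector.2.1) (pvDiffWitness_new_check_knot_vector.2.2) ∧ new_check_knot_vector (pvDiffWitness_new_check_knot_vector.1) (pvDiffWitness_new_check_knot_vector.2.1) (pvDiffWitness_new_check_knot_vector.2.2) = pvDiffWitnessOut_new_check_knot_vector.1 ∧ new_check_knot_vector_alt (pvDiffWitness_new_check_knot_vector.1) (pvDiffWitness_new_check_knot_vector.2.1) (pvDiffWitness_new_check_knot_vector.2.2) = pvDiffWitnessOut_new_check_knot_vector.2 ∧ pvDiffWitnessOut_new_check_knot_vector.1 ≠ pvDiffWitnessOut_new_check_knot_vector.2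
def Claim_exact_new_check_knot_vector : Prop := ∀ (degree : Int) (knot_vector : List Int) (control_points_size : Int), Dom_new_check_knot_vector degree knot_vector control_points_size → Pre_new_check_knot_vector degree knot_vector control_points_size → D_new_check_knot_vector degree knot_vector control_points_size → new_check_knot_vector degree knot_vector control_points_size ≠ new_check_knot_vector_alt degree knot_vector control_points_size

-- ===== LEMMAS AND PROOFS =====

theorem pvAscLoop_isChain (l : List Int) : ∀ prev : Int, pvAscLoop prev l = true ↔ List.IsChain (· ≤ ·) (prev :: l) := by
  induction l with
  | nil => intro prev; simp [pvAscLoop]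
  | cons k rest ih =>
      intro prev
      by_cases h : prev > k
      · simp [pvAscLoop, h, List.isChain_cons_cons]
      · have h' : prev ≤ k := by omega
        simp [pvAscLoop, h, ih k, List.isChain_cons_cons, h']

theorem sorted_eq_iff_pairwise (kv : List Int) :
    (kv = PySem.List.sorted kv (fun x => x) false) ↔ kv.Pairwise (· ≤ ·) := by
  constructor
  · intro h
    have := PySem.List.sorted_pairwise (xs := kv) (key := fun x : Int => x)
    rw [← h] at this
    exact this
  · intro h
    exact (PySem.List.sorted_eq_self_of_pairwise (xs := kv) (key := fun x : Int => x) h).symm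

theorem pvAscLoop_pairwise (k0 : Int) (rest : List Int) :
    pvAscLoop k0 (k0 :: rest) = decide ((k0 :: rest).Pairwise (· ≤ ·)) := by
  have h : pvAscLoop k0 (k0 :: rest) = true ↔ (k0 :: rest).Pairwise (· ≤ ·) := by
    rw [pvAscLoop_isChain, List.isChain_cons_cons, ← List.isChain_iff_pairwise]
    simp
  by_cases hp : (k0 :: rest).Pairwise (· ≤ ·)
  · rw [decide_eq_true hp, h.mpr hp]
  · rw [decide_eq_false hp]
    rcases Bool.eq_false_or_eq_true (pvAscLoop k0 (k0 :: rest)) with hb | hb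
    · exact absurd (h.mp hb) hp
    · exact hb


-- ===== VERDICT (by name: the statement is the Claim_ definition above) =====
theorem new_check_knot_vector_spec : Claim_unchanged_new_check_knot_vector := by
  intro degree kv cps _ hpre hnd
  show new_check_knot_vector degree kv cps = new_check_knot_vector_alt degree kv cps
  unfold new_check_knot_vector new_check_knot_vector_alt
  by_cases hlen : (kv.length : Int) = degree + cps + 1
  · rw [if_neg (not_not_intro hlen)]
    by_cases hsmall : kv.length ≤ 256
    · rw [if_neg (not_not_intro ⟨hlen, hsmall⟩)]
      rcases kv with _ | ⟨k0, rest⟩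
      · exact absurd rfl hpre
      · show pvAscLoop k0 (k0 :: rest) = _
        rw [pvAscLoop_pairwise]
        simp only [decide_eq_decide]
        exact (sorted_eq_iff_pairwise _).symm
    · -- length formula holds but len > 256: A's identity test fails → A = false;
      -- outside D_ the vector is not non-decreasing, so B = false too.
      rw [if_pos (by rintro ⟨_, h⟩; exact hsmall h)]
      have hnp : ¬ kv = PySem.List.sorted kv (fun x => x) false := by
        intro hp
        exact hnd ⟨hlen, by omega, (sorted_eq_iff_pairwise kv).mp hp⟩
      exact (decide_eq_false hnp).symm
  · rw [if_pos (by rintro ⟨h, _⟩; exact hlen h), if_pos hlen]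

set_option maxRecDepth 8000 in
theorem new_check_knot_vector_changed : Claim_changed_new_check_knot_vector := by
  unfold Claim_changed_new_check_knot_vector pvDiffWitnessOut_new_check_knot_vector
  have h1 : pvDiffWitness_new_check_knot_vector.1 = 0 := rfl
  have h2 : pvDiffWitness_new_check_knot_vector.2.1 = List.replicate 257 (0 : Int) := rfl
  have h3 : pvDiffWitness_new_check_knot_vector.2.2 = 256 := rfl
  rw [h1, h2, h3]
  have hp : (List.replicate 257 (0 : Int)).Pairwise (· ≤ ·) :=
    List.pairwise_replicate.mpr (Or.inr le_rfl)
  refine ⟨by simp [Dom_new_check_knot_vector, pvDomInt], by simp [Pre_new_check_knot_vector], ⟨by norm_num, by norm_num, hp⟩, ?_, ?_, by decide⟩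
  · unfold new_check_knot_vector
    rw [if_pos (by rintro ⟨_, h⟩; simp at h)]
  · unfold new_check_knot_vector_alt
    rw [if_neg (by norm_num)]
    show decide _ = true
    exact decide_eq_true ((sorted_eq_iff_pairwise _).mpr hp)

theorem new_check_knot_vector_tight : Claim_exact_new_check_knot_vector := by
  intro degree kv cps _ _ hd
  obtain ⟨hlen, hbig, hp⟩ := hd
  have ha : new_check_knot_vector degree kv cps = false := by
    unfold new_check_knot_vector
    rw [if_pos (by rintro ⟨_, h⟩; omega)]
  have hb : new_check_knot_vector_alt degree kv cps = true := by
    unfold new_check_knot_vector_alt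
    rw [if_neg (not_not_intro hlen)]
    exact decide_eq_true ((sorted_eq_iff_pairwise _).mpr hp)
  simp [ha, hb]
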